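-- pv_equiv track=rewrite | github.com/dabzse/HackerRank | Algorithms/Implementation/Larry's Array.py | larrysArray
-- ===== SOURCE A (Python) =====
-- def larrysArray(A):
--     # Write your code here
--     def count_inversions(arr):
--         inv_count = 0
--         for i, val_i in enumerate(arr):
--             for j, val_j in enumerate(arr[i + 1 :], start=i + 1):
--                 if val_i > val_j:
--                     inv_count += 1
--         return inv_count
--
--     inversions = count_inversions(A)
--     if inversions % 2 == 0:
--         return "YES"
--     else:
--         return "NO"
-- ===== SOURCE B (Python) =====
-- def larrysArray(A):
--     # Merge-sort inversion counting: O(n log n) instead of the quadratic double loop.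
--     def sort_count(a):
--         n = len(a)
--         if n < 2:
--             return a, 0
--         left, cl = sort_count(a[: n // 2])
--         right, cr = sort_count(a[n // 2 :])
--         merged = []
--         i = j = cross = 0
--         while i < len(left) and j < len(right):
--             if left[i] <= right[j]:
--                 merged.append(left[i])
--                 i += 1
--             else:
--                 merged.append(right[j])
--                 j += 1
--                 cross += len(left) - i
--         merged.extend(left[i:])
--         merged.extend(right[j:])
--         return merged, cl + cr + cross
--
--     _, inversions = sort_count(A)
--     return "YES" if inversions % 2 == 0 else "NO"
-- ===== Notes on version B (the rewrite author's own statement) =====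
-- stated objective: faster
-- what changed: Replaces the quadratic nested-loop inversion count with merge-sort inversion counting (divide, recurse, count cross-inversions while merging).
import Mathlib
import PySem

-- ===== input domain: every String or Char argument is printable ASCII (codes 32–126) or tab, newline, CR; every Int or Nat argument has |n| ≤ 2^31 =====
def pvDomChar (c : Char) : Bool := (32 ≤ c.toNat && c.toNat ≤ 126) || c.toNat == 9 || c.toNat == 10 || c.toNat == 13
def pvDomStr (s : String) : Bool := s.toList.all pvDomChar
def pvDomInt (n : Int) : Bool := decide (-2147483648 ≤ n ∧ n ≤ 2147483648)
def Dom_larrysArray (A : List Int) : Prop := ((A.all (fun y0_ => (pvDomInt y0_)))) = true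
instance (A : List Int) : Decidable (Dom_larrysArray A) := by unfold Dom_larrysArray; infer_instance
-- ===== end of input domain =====

-- B replaces A's quadratic nested-loop inversion count with merge-sort inversion counting (asymptotically faster).

-- ===== PORT A =====
-- literal transliteration: outer 'for i, val_i in enumerate(arr)', inner 'for j, val_j in enumerate(arr[i+1:], start=i+1)'
def larrysArray (A : List Int) : String :=
  let inversions : Int :=
    (PySem.List.enumerate A 0).foldl
      (fun inv_count p =>
        (PySem.List.enumerate (PySem.List.slice A (some (p.1 + 1)) none) (p.1 + 1)).foldl
          (fun c q => if p.2 > q.2 then c + 1 else c) inv_count) 0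
  if PySem.Int.mod inversions 2 == 0 then "YES" else "NO"

-- ===== PORT B =====
-- the merge loop of Source B: take the smaller head; when the right head wins, add the left remainder's length
def pvMergeCount : List Int → List Int → List Int × Int
  | [], r => (r, 0)
  | x :: l, [] => (x :: l, 0)
  | x :: l, y :: r =>
    if x ≤ y then
      let m := pvMergeCount l (y :: r)
      (x :: m.1, m.2)
    else
      let m := pvMergeCount (x :: l) r
      (y :: m.1, m.2 + ((x :: l).length : Int))

-- sort_count of Source B: split in half, recurse, merge counting cross inversions
def pvSortCount (a : List Int) : List Int × Int :=
  if a.length < 2 then (a, 0)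
  else
    let L := pvSortCount (a.take (a.length / 2))
    let R := pvSortCount (a.drop (a.length / 2))
    let M := pvMergeCount L.1 R.1
    (M.1, L.2 + R.2 + M.2)
termination_by a.length
decreasing_by
  · simp only [List.length_take]; omega
  · simp only [List.length_drop]; omega

def larrysArray_alt (A : List Int) : String :=
  let inversions := (pvSortCount A).2
  if PySem.Int.mod inversions 2 == 0 then "YES" else "NO"

-- ===== PRECONDITION & SPEC =====
def Spec_larrysArray (A : List Int) (out : String) : Prop := out = larrysArray_alt A
instance (A : List Int) (out : String) : Decidable (Spec_larrysArray A out) := by unfold Spec_larrysArray; infer_instance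

-- ===== CLAIM (what is proved, stated in full; the proofs are below) =====
def Claim_equal_larrysArray : Prop := ∀ (A : List Int), Dom_larrysArray A → Spec_larrysArray A (larrysArray A)

-- ===== LEMMAS AND PROOFS =====

-- number of inversions of a list, counted head against tail
def pvInv : List Int → Nat
  | [] => 0
  | x :: xs => xs.countP (fun y => decide (y < x)) + pvInv xs

-- cross inversions between two blocks
def pvCross (l r : List Int) : Nat := (l.map (fun x => r.countP (fun y => decide (y < x)))).sum

lemma pvCross_cons_right (y : Int) : ∀ (l r : List Int),
    pvCross l (y :: r) = pvCross l r + l.countP (fun z => decide (y < z)) := by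
  intro l r
  induction l with
  | nil => simp [pvCross]
  | cons a s ihs =>
    simp only [pvCross, List.map_cons, List.sum_cons] at ihs ⊢
    rw [show (y :: r).countP (fun z => decide (z < a))
          = r.countP (fun z => decide (z < a)) + (if y < a then 1 else 0) from by
        simp [List.countP_cons]]
    rw [show (a :: s).countP (fun z => decide (y < z))
          = s.countP (fun z => decide (y < z)) + (if y < a then 1 else 0) from by
        rw [List.countP_cons]; simp]
    rw [ihs]
    split_ifs with h <;> ring

lemma pvInv_append (l r : List Int) : pvInv (l ++ r) = pvInv l + pvCross l r + pvInv r := by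
  induction l with
  | nil => simp [pvInv, pvCross]
  | cons x l ih => simp [pvInv, pvCross, List.countP_append, ih, List.map_cons]; ring

lemma pvCross_perm {l₁ l₂ r₁ r₂ : List Int} (hl : l₁.Perm l₂) (hr : r₁.Perm r₂) :
    pvCross l₁ r₁ = pvCross l₂ r₂ := by
  unfold pvCross
  have hf : (fun x : Int => r₁.countP (fun y => decide (y < x)))
      = (fun x : Int => r₂.countP (fun y => decide (y < x))) := by
    funext x; exact hr.countP_eq _
  rw [hf]; exact (hl.map _).sum_eq

-- A-side: the inner loop is a count of later, smaller elements
lemma pvInnerA (v : Int) (l : List Int) : ∀ (t c : Int),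
    (PySem.List.enumerate l t).foldl (fun c q => if v > q.2 then c + 1 else c) c
      = c + (l.countP (fun y => decide (y < v)) : Int) := by
  induction l with
  | nil => intro t c; simp [PySem.List.enumerate_nil]
  | cons x l ih =>
    intro t c
    rw [PySem.List.enumerate_cons]
    simp only [List.foldl_cons, List.countP_cons]
    by_cases h : x < v
    · simp [h, ih]; push_cast; ring
    · have : ¬ v > x := h
      simp [this, ih]

-- A-side: the outer loop over the suffix starting at s accumulates pvInv of that suffix
lemma pvOuterA (A : List Int) : ∀ (k s : Nat), (A.drop s).length = k → ∀ (acc : Int),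
    (PySem.List.enumerate (A.drop s) (s : Int)).foldl
      (fun inv_count p =>
        (PySem.List.enumerate (PySem.List.slice A (some (p.1 + 1)) none) (p.1 + 1)).foldl
          (fun c q => if p.2 > q.2 then c + 1 else c) inv_count) acc
      = acc + (pvInv (A.drop s) : Int) := by
  intro k
  induction k with
  | zero =>
    intro s hs acc
    have : A.drop s = [] := List.length_eq_zero_iff.mp hs
    simp [this, PySem.List.enumerate_nil, pvInv]
  | succ k ih =>
    intro s hs acc
    cases hd : A.drop s with
    | nil => simp [hd] at hs
    | cons x t =>
      have ht : A.drop (s + 1) = t := by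
        rw [← List.tail_drop, hd]; rfl
      rw [PySem.List.enumerate_cons]
      simp only [List.foldl_cons]
      have hslice : PySem.List.slice A (some ((s : Int) + 1)) none = t := by
        have : ((s : Int) + 1) = ((s + 1 : Nat) : Int) := by push_cast; ring
        rw [this, PySem.List.slice_from_natCast, ht]
      rw [hslice, pvInnerA]
      have hlen : (A.drop (s + 1)).length = k := by
        rw [ht]; have := hs; rw [hd] at this; simpa using this
      have := ih (s + 1) hlen (acc + (t.countP (fun y => decide (y < x)) : Int))
      rw [ht] at this
      have hcast : ((s : Int) + 1) = ((s + 1 : Nat) : Int) := by push_cast; ring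
      rw [hcast, this]
      simp [pvInv]
      push_cast; ring

-- B-side: merge on sorted inputs returns a sorted permutation and exactly the cross-inversion count
lemma pvMergeCount_spec : ∀ (l r : List Int), List.Pairwise (· ≤ ·) l → List.Pairwise (· ≤ ·) r →
    (pvMergeCount l r).1.Perm (l ++ r) ∧ List.Pairwise (· ≤ ·) (pvMergeCount l r).1 ∧
      (pvMergeCount l r).2 = (pvCross l r : Int) := by
  intro l r
  fun_induction pvMergeCount l r with
  | case1 r => intro _ hr; simp [pvCross, hr]
  | case2 x l => intro hl _; simp [pvCross, hl]
  | case3 x l y r hxy m ih =>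
    intro hl hr
    obtain ⟨hperm, hsort, hcnt⟩ := ih (List.pairwise_cons.mp hl).2 hr
    refine ⟨?_, ?_, ?_⟩
    · exact hperm.cons x
    · show List.Pairwise (fun x1 x2 => x1 ≤ x2) (x :: m.1)
      rw [List.pairwise_cons]
      refine ⟨?_, hsort⟩
      intro b hb
      have hb' : b ∈ l ++ y :: r := hperm.mem_iff.mp hb
      rcases List.mem_append.mp hb' with h | h
      · exact (List.pairwise_cons.mp hl).1 b h
      · rcases List.mem_cons.mp h with rfl | h
        · exact hxy
        · exact le_trans hxy ((List.pairwise_cons.mp hr).1 b h)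
    · show m.2 = (pvCross (x :: l) (y :: r) : Int)
      rw [hcnt]
      have hzero : (y :: r).countP (fun z => decide (z < x)) = 0 := by
        rw [List.countP_eq_zero]
        intro a ha
        simp only [decide_eq_true_eq]
        rcases List.mem_cons.mp ha with rfl | ha
        · omega
        · have := (List.pairwise_cons.mp hr).1 a ha; omega
      simp [pvCross, List.map_cons, hzero]
  | case4 x l y r hxy m ih =>
    intro hl hr
    obtain ⟨hperm, hsort, hcnt⟩ := ih hl (List.pairwise_cons.mp hr).2
    have hyx : y < x := by omega
    refine ⟨?_, ?_, ?_⟩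
    · exact (hperm.cons y).trans (List.perm_middle (a := y) (l₁ := x :: l) (l₂ := r)).symm
    · show List.Pairwise (fun x1 x2 => x1 ≤ x2) (y :: m.1)
      rw [List.pairwise_cons]
      refine ⟨?_, hsort⟩
      intro b hb
      have hb' : b ∈ x :: l ++ r := hperm.mem_iff.mp hb
      rcases List.mem_append.mp hb' with h | h
      · rcases List.mem_cons.mp h with rfl | h
        · omega
        · have := (List.pairwise_cons.mp hl).1 b h; omega
      · exact (List.pairwise_cons.mp hr).1 b h
    · show m.2 + ((x :: l).length : Int) = (pvCross (x :: l) (y :: r) : Int)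
      rw [hcnt]
      have hall : (x :: l).countP (fun z => decide (y < z)) = (x :: l).length := by
        rw [List.countP_eq_length]
        intro a ha
        simp only [decide_eq_true_eq]
        rcases List.mem_cons.mp ha with rfl | ha
        · omega
        · have := (List.pairwise_cons.mp hl).1 a ha; omega
      have hsplit := pvCross_cons_right y (x :: l) r
      rw [hsplit, hall]
      push_cast; ring

-- B-side: sort_count returns a sorted permutation and the exact inversion count
lemma pvSortCount_spec : ∀ (a : List Int),
    (pvSortCount a).1.Perm a ∧ List.Pairwise (· ≤ ·) (pvSortCount a).1 ∧ (pvSortCount a).2 = (pvInv a : Int) := by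
  intro a
  fun_induction pvSortCount a with
  | case1 a h =>
    match a, h with
    | [], _ => exact ⟨List.Perm.refl _, List.Pairwise.nil, by simp [pvInv]⟩
    | [x], _ => exact ⟨List.Perm.refl _, by simp, by simp [pvInv]⟩
  | case2 a h L R M ihL ihR =>
    obtain ⟨pL, sL, cL⟩ := ihL
    obtain ⟨pR, sR, cR⟩ := ihR
    obtain ⟨pM, sM, cM⟩ := pvMergeCount_spec L.1 R.1 sL sR
    have hsplit : a.take (a.length / 2) ++ a.drop (a.length / 2) = a := List.take_append_drop _ _
    refine ⟨?_, sM, ?_⟩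
    · refine pM.trans ?_
      have hp := pL.append pR
      rw [hsplit] at hp
      exact hp
    · show L.2 + R.2 + M.2 = (pvInv a : Int)
      rw [cL, cR, cM, pvCross_perm pL pR]
      have hinv : pvInv a = pvInv (a.take (a.length / 2) ++ a.drop (a.length / 2)) := by
        rw [hsplit]
      rw [hinv, pvInv_append]
      push_cast; ring

-- ===== VERDICT (by name: the statement is the Claim_ definition above) =====
theorem larrysArray_spec : Claim_equal_larrysArray := by
  intro A _
  unfold Spec_larrysArray larrysArray larrysArray_alt
  have hA : (PySem.List.enumerate A 0).foldl
      (fun inv_count p =>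
        (PySem.List.enumerate (PySem.List.slice A (some (p.1 + 1)) none) (p.1 + 1)).foldl
          (fun c q => if p.2 > q.2 then c + 1 else c) inv_count) 0 = (pvInv A : Int) := by
    have := pvOuterA A A.length 0 (by simp) 0
    simpa using this
  rw [hA, (pvSortCount_spec A).2.2]
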